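-- pv_equiv track=rewrite | github.com/CSU-KangHu/HiTE | ReferenceMode/Util.py | generate_candidate_repeats_v2
-- ===== SOURCE A (Python) =====
-- def generate_candidate_repeats_v2(contigs, k_num, unique_kmer_map, partiton_index, fault_tolerant_bases):
--     cur_lines = []
--     cur_masked_segments = {}
--     for ref_name in contigs.keys():
--         line = contigs[ref_name]
--         cur_lines.append(line)
--         masked_line = list(line)
--         last_masked_pos = -1
--         for i in range(len(line)-k_num+1):
--             kmer = line[i: i+k_num]
--             # get reverse complement kmer
--             r_kmer = getReverseSequence(kmer)
--             # filter invalid kmer, contains 'N'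
--             if "N" in r_kmer:
--                 continue
--             unique_key = kmer if kmer < r_kmer else r_kmer
--
--             if unique_kmer_map.__contains__(unique_key):
--                 # mask position
--                 if last_masked_pos == -1:
--                     for j in range(i, i+k_num):
--                         masked_line[j] = 'X'
--                     last_masked_pos = i+k_num-1
--                 else:
--                     # do not need to mask position which has been masked
--                     start_mask_pos = i if i > last_masked_pos else last_masked_pos+1
--                     end_mask_pos = i+k_num
--                     for j in range(start_mask_pos, end_mask_pos):
--                         masked_line[j] = 'X'
--                     last_masked_pos = end_mask_pos - 1
--         cur_masked_segments[ref_name] = masked_line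
--
--     repeat_dict = {}
--     cur_repeat_str = ''
--     try_connect_str = ''
--     last_start_pos = -1
--     last_end_pos = -1
--     for seq_index, cur_masked_item in enumerate(cur_masked_segments.items()):
--         ref_name = cur_masked_item[0]
--         cur_masked_segment = cur_masked_item[1]
--         if not repeat_dict.__contains__(ref_name):
--             repeat_dict[ref_name] = []
--         repeat_list = repeat_dict[ref_name]
--         for i in range(len(cur_masked_segment)):
--             if cur_masked_segment[i] == 'X':
--                 if last_start_pos == -1:
--                     # record masked sequence start position
--                     last_start_pos = i
--                 if try_connect_str != '':
--                     # recover skip gap sequence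
--                     cur_repeat_str = try_connect_str
--                     try_connect_str = ''
--                 cur_repeat_str = cur_repeat_str + cur_lines[seq_index][i]
--                 last_end_pos = i
--             elif cur_repeat_str != '':
--                 # meet unmasked base
--                 if (i - last_end_pos) <= fault_tolerant_bases:
--                     # skip gap
--                     if try_connect_str == '':
--                         try_connect_str = cur_repeat_str
--                     try_connect_str = try_connect_str + cur_lines[seq_index][i]
--                 else:
--                     # can not skip gap
--                     repeat_list.append((last_start_pos, last_end_pos, cur_repeat_str))
--                     cur_repeat_str = ''
--                     try_connect_str = ''
--                     last_start_pos = -1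
--         # keep last masked sequence
--         if cur_repeat_str != '':
--             repeat_list.append((last_start_pos, last_end_pos, cur_repeat_str))
--             cur_repeat_str = ''
--             try_connect_str = ''
--             last_start_pos = -1
--         repeat_dict[ref_name] = repeat_list
--     return repeat_dict
--
-- def getReverseSequence(sequence):
--     base_map = {'A': 'T', 'T': 'A', 'C': 'G', 'G': 'C'}
--     res = ''
--     length = len(sequence)
--     i = length - 1
--     while i >= 0:
--         base = sequence[i]
--         if base not in base_map.keys():
--             base = 'N'
--         else:
--             base = base_map[base]
--         res += base
--         i -= 1
--     return res
-- ===== SOURCE B (Python) =====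
-- def getReverseSequence(sequence):
--     base_map = {'A': 'T', 'T': 'A', 'C': 'G', 'G': 'C'}
--     res = ''
--     length = len(sequence)
--     i = length - 1
--     while i >= 0:
--         base = sequence[i]
--         if base not in base_map.keys():
--             base = 'N'
--         else:
--             base = base_map[base]
--         res += base
--         i -= 1
--     return res
--
--
-- def _mask_contig(line, k_num, unique_kmer_map):
--     # Phase 1 (kept as in the original): mask every position covered by a known unique kmer.
--     masked_line = list(line)
--     last_masked_pos = -1
--     for i in range(len(line) - k_num + 1):
--         kmer = line[i: i + k_num]
--         r_kmer = getReverseSequence(kmer)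
--         if "N" in r_kmer:
--             continue
--         unique_key = kmer if kmer < r_kmer else r_kmer
--         if unique_key in unique_kmer_map:
--             if last_masked_pos == -1:
--                 for j in range(i, i + k_num):
--                     masked_line[j] = 'X'
--                 last_masked_pos = i + k_num - 1
--             else:
--                 start_mask_pos = i if i > last_masked_pos else last_masked_pos + 1
--                 end_mask_pos = i + k_num
--                 for j in range(start_mask_pos, end_mask_pos):
--                     masked_line[j] = 'X'
--                 last_masked_pos = end_mask_pos - 1
--     return masked_line
--
--
-- def _x_runs(masked):
--     # maximal runs of consecutive 'X' positions, as (start, end) inclusive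
--     runs = []
--     start = None
--     for i, ch in enumerate(masked):
--         if ch == 'X':
--             if start is None:
--                 start = i
--         elif start is not None:
--             runs.append((start, i - 1))
--             start = None
--     if start is not None:
--         runs.append((start, len(masked) - 1))
--     return runs
--
--
-- def _merge_runs(runs, fault_tolerant_bases):
--     # merge consecutive runs whose gap (number of non-X bases between them) is within tolerance
--     if not runs:
--         return []
--     merged = []
--     cs, ce = runs[0]
--     for s, e in runs[1:]:
--         if s - ce - 1 <= fault_tolerant_bases:
--             ce = e
--         else:
--             merged.append((cs, ce))
--             cs, ce = s, e
--     merged.append((cs, ce))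
--     return merged
--
--
-- def generate_candidate_repeats_v2(contigs, k_num, unique_kmer_map, partiton_index, fault_tolerant_bases):
--     repeat_dict = {}
--     for ref_name in contigs.keys():
--         line = contigs[ref_name]
--         masked = _mask_contig(line, k_num, unique_kmer_map)
--         runs = _merge_runs(_x_runs(masked), fault_tolerant_bases)
--         repeat_dict[ref_name] = [(s, e, line[s:e + 1]) for s, e in runs]
--     return repeat_dict
-- ===== Notes on version B (the rewrite author's own statement) =====
-- stated objective: simpler
-- what changed: Phase 2's five-variable cur_repeat_str/try_connect_str state machine is replaced by collecting maximal 'X' runs per contig, merging runs whose gap is within the tolerance, and emitting each merged interval as a slice line[s:e+1]; the cross-contig accumulator state disappears.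
import Mathlib
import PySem

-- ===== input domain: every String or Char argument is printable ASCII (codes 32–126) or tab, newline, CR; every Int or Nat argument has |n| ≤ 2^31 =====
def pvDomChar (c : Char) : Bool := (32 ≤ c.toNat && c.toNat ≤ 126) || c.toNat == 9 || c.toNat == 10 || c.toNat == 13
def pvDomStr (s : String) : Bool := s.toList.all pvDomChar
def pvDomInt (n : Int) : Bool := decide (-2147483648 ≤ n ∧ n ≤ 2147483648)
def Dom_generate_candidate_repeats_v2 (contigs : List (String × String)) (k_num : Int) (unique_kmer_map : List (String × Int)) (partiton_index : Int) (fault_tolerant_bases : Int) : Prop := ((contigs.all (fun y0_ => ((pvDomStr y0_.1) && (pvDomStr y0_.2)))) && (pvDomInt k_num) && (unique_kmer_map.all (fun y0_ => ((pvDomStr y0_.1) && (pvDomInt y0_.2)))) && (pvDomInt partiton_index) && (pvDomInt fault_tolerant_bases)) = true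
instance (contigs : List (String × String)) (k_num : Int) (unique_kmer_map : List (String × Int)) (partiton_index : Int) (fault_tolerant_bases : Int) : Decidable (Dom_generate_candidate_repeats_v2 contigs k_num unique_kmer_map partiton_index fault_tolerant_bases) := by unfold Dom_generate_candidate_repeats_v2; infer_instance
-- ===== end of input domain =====

-- B replaces A's phase-2 five-variable string-accumulator state machine by an
-- X-run collection, a gap-merge pass and slice extraction (objective: simpler).

-- ===== PORT A =====
-- shared phase-1 helpers (identical code in Source A and Source B): reverse complement and kmer masking

-- Python's `kmer < r_kmer` on strings: lexicographic comparison of code points (exact for all Chars)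
def pvStrLt : List Char → List Char → Bool
  | [], [] => false
  | [], _ :: _ => true
  | _ :: _, [] => false
  | a :: as, b :: bs =>
    if a.toNat < b.toNat then true else if b.toNat < a.toNat then false else pvStrLt as bs

-- getReverseSequence: builds the complement walking from the last char to the first
def pvBaseMap (c : Char) : Char :=
  if c = 'A' then 'T' else if c = 'T' then 'A' else if c = 'C' then 'G'
  else if c = 'G' then 'C' else 'N'

def pvRevComp : List Char → List Char
  | [] => []
  | c :: rest => pvRevComp rest ++ [pvBaseMap c]

-- for j in range(a, b): masked_line[j] = 'X'   (every j generated is provably in [0, len), so .set j.toNat is exact)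
def pvMaskRange (masked : List Char) (a b : Int) : List Char :=
  (PySem.List.pyRange a b 1).foldl (fun m j => m.set j.toNat 'X') masked

-- the masking loop over kmer start positions, state = (masked_line, last_masked_pos)
def pvMaskLine (lineL : List Char) (k_num : Int) (ud : PySem.Dict String Int) : List Char :=
  ((PySem.List.pyRange 0 (PySem.List.len lineL - k_num + 1) 1).foldl
    (fun (st : List Char × Int) i =>
      let kmer := PySem.List.slice lineL (some i) (some (i + k_num))
      let r_kmer := pvRevComp kmer
      if 'N' ∈ r_kmer then st
      else
        let unique_key := if pvStrLt kmer r_kmer then kmer else r_kmer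
        if ud.contains (String.ofList unique_key) then
          if st.2 = -1 then
            (pvMaskRange st.1 i (i + k_num), i + k_num - 1)
          else
            (pvMaskRange st.1 (if st.2 < i then i else st.2 + 1) (i + k_num), i + k_num - 1)
        else st)
    (lineL, -1)).1

-- A's first loop: per reference (dict order) the original line and its masked copy,
-- aligned exactly as A's cur_lines / cur_masked_segments.items() are
def pvPrep (contigs : List (String × String)) (k_num : Int) (ukm : List (String × Int)) :
    List (String × List Char × List Char) :=
  let cd := PySem.Dict.ofList contigs
  let ud := PySem.Dict.ofList ukm
  cd.keys.map (fun r =>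
    let lineL := (cd.getD r "").toList
    (r, lineL, pvMaskLine lineL k_num ud))

-- A's phase-2 character loop; state (repeat_list, cur_repeat_str, try_connect_str, last_start_pos, last_end_pos)
def pvScanA (ft : Int) : List Char → List Char → Int →
    List (Int × Int × String) → List Char → List Char → Int → Int →
    List (Int × Int × String) × List Char × List Char × Int × Int
  | [], _, _, acc, cur, tryc, ls, le => (acc, cur, tryc, ls, le)
  | _ :: _, [], _, acc, cur, tryc, ls, le => (acc, cur, tryc, ls, le)  -- unreachable: masked copy has the line's length
  | c :: ms, ch :: l, i, acc, cur, tryc, ls, le =>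
    if c = 'X' then
      pvScanA ft ms l (i + 1) acc ((if tryc ≠ [] then tryc else cur) ++ [ch]) []
        (if ls = -1 then i else ls) i
    else if cur ≠ [] then
      if i - le ≤ ft then
        pvScanA ft ms l (i + 1) acc cur ((if tryc = [] then cur else tryc) ++ [ch]) ls le
      else
        pvScanA ft ms l (i + 1) (acc ++ [(ls, le, String.ofList cur)]) [] [] (-1) le
    else pvScanA ft ms l (i + 1) acc cur tryc ls le

def generate_candidate_repeats_v2 (contigs : List (String × String)) (k_num : Int) (unique_kmer_map : List (String × Int)) (partiton_index : Int) (fault_tolerant_bases : Int) : List (String × List (Int × Int × String)) :=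
  (( (pvPrep contigs k_num unique_kmer_map).foldl
    (fun (st : PySem.Dict String (List (Int × Int × String)) × List Char × List Char × Int × Int) item =>
      let d := if st.1.contains item.1 then st.1 else st.1.insert item.1 []
      let r := pvScanA fault_tolerant_bases item.2.2 item.2.1 0 (d.getD item.1 []) st.2.1 st.2.2.1 st.2.2.2.1 st.2.2.2.2
      if r.2.1 ≠ [] then
        (d.insert item.1 (r.1 ++ [(r.2.2.2.1, r.2.2.2.2, String.ofList r.2.1)]), [], [], -1, r.2.2.2.2)
      else (d.insert item.1 r.1, r.2.1, r.2.2.1, r.2.2.2.1, r.2.2.2.2))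
    (PySem.Dict.empty, [], [], -1, -1)).1).items

-- ===== PORT B =====
-- phase 1 of Source B is the same masking code (pvMaskLine above); phase 2 is runs → merge → slices

-- Source B's _x_runs: one pass over the masked chars; st = start of the open 'X' run (none if outside a run)
def pvXRunsAux (i : Int) (st : Option Int) : List Char → List (Int × Int)
  | [] =>
    match st with
    | some s => [(s, i - 1)]
    | none => []
  | c :: ms =>
    if c = 'X' then pvXRunsAux (i + 1) (some (st.getD i)) ms
    else
      match st with
      | some s => (s, i - 1) :: pvXRunsAux (i + 1) none ms
      | none => pvXRunsAux (i + 1) none ms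

def pvXRuns (i : Int) (ms : List Char) : List (Int × Int) := pvXRunsAux i none ms

-- Source B's _merge_runs: fold the current merged interval (s, e) through the remaining runs
def pvMergeInto (ft : Int) (s e : Int) : List (Int × Int) → List (Int × Int)
  | [] => [(s, e)]
  | p :: rest =>
    if p.1 - e - 1 ≤ ft then pvMergeInto ft s p.2 rest
    else (s, e) :: pvMergeInto ft p.1 p.2 rest

def pvMergeRuns (ft : Int) : List (Int × Int) → List (Int × Int)
  | [] => []
  | p :: rest => pvMergeInto ft p.1 p.2 rest

def generate_candidate_repeats_v2_alt (contigs : List (String × String)) (k_num : Int) (unique_kmer_map : List (String × Int)) (partiton_index : Int) (fault_tolerant_bases : Int) : List (String × List (Int × Int × String)) :=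
  let cd := PySem.Dict.ofList contigs
  let ud := PySem.Dict.ofList unique_kmer_map
  cd.keys.map (fun r =>
    let lineL := (cd.getD r "").toList
    let masked := pvMaskLine lineL k_num ud
    (r, (pvMergeRuns fault_tolerant_bases (pvXRuns 0 masked)).map
          (fun p => (p.1, p.2, String.ofList (PySem.List.slice lineL (some p.1) (some (p.2 + 1)))))))

-- ===== PRECONDITION & SPEC =====
def Spec_generate_candidate_repeats_v2 (contigs : List (String × String)) (k_num : Int) (unique_kmer_map : List (String × Int)) (partiton_index : Int) (fault_tolerant_bases : Int) (out : List (String × List (Int × Int × String))) : Prop := out = generate_candidate_repeats_v2_alt contigs k_num unique_kmer_map partiton_index fault_tolerant_bases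
instance (contigs : List (String × String)) (k_num : Int) (unique_kmer_map : List (String × Int)) (partiton_index : Int) (fault_tolerant_bases : Int) (out : List (String × List (Int × Int × String))) : Decidable (Spec_generate_candidate_repeats_v2 contigs k_num unique_kmer_map partiton_index fault_tolerant_bases out) := by unfold Spec_generate_candidate_repeats_v2; infer_instance

-- ===== CLAIM (what is proved, stated in full; the proofs are below) =====
def Claim_equal_generate_candidate_repeats_v2 : Prop := ∀ (contigs : List (String × String)) (k_num : Int) (unique_kmer_map : List (String × Int)) (partiton_index : Int) (fault_tolerant_bases : Int), Dom_generate_candidate_repeats_v2 contigs k_num unique_kmer_map partiton_index fault_tolerant_bases → Spec_generate_candidate_repeats_v2 contigs k_num unique_kmer_map partiton_index fault_tolerant_bases (generate_candidate_repeats_v2 contigs k_num unique_kmer_map partiton_index fault_tolerant_bases)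

-- ===== LEMMAS AND PROOFS =====

-- proof-only helpers: absolute segments of the line, run separation, and the
-- generalized state of A's scan expressed over B's run list

-- chars of the line at absolute positions a..b (inclusive), where l is the line's suffix starting at absolute position j
def pvSeg (j : Int) (l : List Char) (a b : Int) : List Char :=
  (l.drop (a - j).toNat).take (b + 1 - a).toNat

def pvEmit (j : Int) (l : List Char) (runs : List (Int × Int)) : List (Int × Int × String) :=
  runs.map (fun p => (p.1, p.2, String.ofList (pvSeg j l p.1 p.2)))

-- well-formed run list: starts at or after j, nonempty, separated by at least one gap char
def pvSep (j : Int) : List (Int × Int) → Prop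
  | [] => True
  | p :: rest => j ≤ p.1 ∧ p.1 ≤ p.2 ∧ pvSep (p.2 + 2) rest

-- what A's scan produces from an active state (pending interval (s,e), committed chars cur,
-- tentative chars t0) when the future X-runs are `runs` (l = line suffix from absolute position j)
def pvChain (ft j : Int) (l : List Char) : Int → Int → List Char → List Char → List (Int × Int) → List (Int × Int × String)
  | s, e, cur, _, [] => [(s, e, String.ofList cur)]
  | s, e, cur, t0, p :: rest =>
    if p.1 - e - 1 ≤ ft ∨ p.1 = e + 1 then
      pvChain ft j l s p.2 (t0 ++ pvSeg j l (max (e + 1) j) p.2) (t0 ++ pvSeg j l (max (e + 1) j) p.2) rest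
    else (s, e, String.ofList cur) :: pvEmit j l (pvMergeInto ft p.1 p.2 rest)

-- A's scan result followed by the end-of-contig flush
def pvFin (r : List (Int × Int × String) × List Char × List Char × Int × Int) : List (Int × Int × String) :=
  if r.2.1 ≠ [] then r.1 ++ [(r.2.2.2.1, r.2.2.2.2, String.ofList r.2.1)] else r.1

theorem pvSeg_empty (j : Int) (l : List Char) (a b : Int) (h : b < a) : pvSeg j l a b = [] := by
  unfold pvSeg
  have h0 : (b + 1 - a).toNat = 0 := by omega
  rw [h0]; simp

theorem pvSeg_cons (j : Int) (ch : Char) (l : List Char) (a b : Int) (h : j + 1 ≤ a) :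
    pvSeg j (ch :: l) a b = pvSeg (j + 1) l a b := by
  unfold pvSeg
  have h1 : (a - j).toNat = (a - (j + 1)).toNat + 1 := by omega
  rw [h1, List.drop_succ_cons]

theorem pvSeg_head (j : Int) (ch : Char) (l : List Char) (b : Int) (h : j ≤ b) :
    pvSeg j (ch :: l) j b = ch :: pvSeg (j + 1) l (j + 1) b := by
  unfold pvSeg
  have h1 : (j - j).toNat = 0 := by omega
  have h2 : (j + 1 - (j + 1)).toNat = 0 := by omega
  have h3 : (b + 1 - j).toNat = (b + 1 - (j + 1)).toNat + 1 := by omega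
  rw [h1, h2, h3]
  simp

theorem pvSeg_append (j : Int) (l : List Char) (a b c : Int) (h1 : j ≤ a) (h2 : a ≤ b + 1) (h3 : b ≤ c) :
    pvSeg j l a b ++ pvSeg j l (b + 1) c = pvSeg j l a c := by
  unfold pvSeg
  have hm : (b + 1 - j).toNat = (a - j).toNat + (b + 1 - a).toNat := by omega
  have hpq : (c + 1 - a).toNat = (b + 1 - a).toNat + (c + 1 - (b + 1)).toNat := by omega
  rw [hpq, List.take_add, hm]
  congr 2
  rw [← List.drop_drop]

theorem pvSep_mono {j j' : Int} (h : j' ≤ j) : ∀ {runs : List (Int × Int)}, pvSep j runs → pvSep j' runs := by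
  intro runs hr
  cases runs with
  | nil => trivial
  | cons p rest => exact ⟨le_trans h hr.1, hr.2.1, hr.2.2⟩

theorem pvXRuns_nil (i : Int) : pvXRuns i [] = [] := rfl

theorem pvXRuns_nonX' {c : Char} (h : c ≠ 'X') (i : Int) (ms : List Char) :
    pvXRuns i (c :: ms) = pvXRuns (i + 1) ms := by
  simp [pvXRuns, pvXRunsAux, h]

theorem pvXRuns_nonX {c : Char} (h : c ≠ 'X') (i : Int) (ms : List Char) :
    pvXRuns i (c :: ms) = pvXRuns (i + 1) ms := pvXRuns_nonX' h i ms

theorem pvSepAux : ∀ (ms : List Char) (j : Int),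
    pvSep j (pvXRunsAux j none ms) ∧ (∀ s : Int, s ≤ j - 1 → pvSep s (pvXRunsAux j (some s) ms)) := by
  intro ms
  induction ms with
  | nil =>
    intro j
    exact ⟨trivial, fun s hs => ⟨le_refl s, by omega, trivial⟩⟩
  | cons c ms ih =>
    intro j
    by_cases hc : c = 'X'
    · subst hc
      constructor
      · simp only [pvXRunsAux, reduceIte, Option.getD_none]
        exact (ih (j + 1)).2 j (by omega)
      · intro s hs
        simp only [pvXRunsAux, reduceIte, Option.getD_some]
        exact (ih (j + 1)).2 s (by omega)
    · constructor
      · simp only [pvXRunsAux, if_neg hc]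
        exact pvSep_mono (by omega) (ih (j + 1)).1
      · intro s hs
        simp only [pvXRunsAux, if_neg hc]
        exact ⟨le_refl s, by omega, pvSep_mono (by omega) (ih (j + 1)).1⟩

theorem pvSep_xruns : ∀ (n : Nat) (ms : List Char), ms.length ≤ n → ∀ (i : Int), pvSep i (pvXRuns i ms) :=
  fun _ ms _ i => (pvSepAux ms i).1

theorem pvXRunsAux_some : ∀ (ms : List Char) (j s : Int),
    pvXRunsAux j (some s) ms = (match pvXRunsAux j none ms with
      | [] => [(s, j - 1)]
      | (s1, e1) :: r => if s1 = j then (s, e1) :: r else (s, j - 1) :: (s1, e1) :: r) := by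
  intro ms
  induction ms with
  | nil => intro j s; rfl
  | cons c ms ih =>
    intro j s
    by_cases hc : c = 'X'
    · subst hc
      simp only [pvXRunsAux, reduceIte, Option.getD_some, Option.getD_none]
      rw [ih (j + 1) s, ih (j + 1) j]
      cases hb : pvXRunsAux (j + 1) none ms with
      | nil => simp
      | cons q r =>
        obtain ⟨qs, qe⟩ := q
        have hsep := (pvSepAux ms (j + 1)).1
        rw [hb] at hsep
        have h1 : j + 1 ≤ qs := hsep.1
        by_cases hadj : qs = j + 1
        · subst hadj; simp
        · simp only [if_neg hadj]
          rw [show j + 1 - 1 = j from by ring]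
          simp
    · simp only [pvXRunsAux, if_neg hc]
      cases hb : pvXRunsAux (j + 1) none ms with
      | nil => rfl
      | cons q r =>
        obtain ⟨qs, qe⟩ := q
        have hsep := (pvSepAux ms (j + 1)).1
        rw [hb] at hsep
        have h1 : j + 1 ≤ qs := hsep.1
        simp [show ¬ qs = j from by omega]

theorem pvXRuns_X (i : Int) (ms : List Char) :
    pvXRuns i ('X' :: ms) = (match pvXRuns (i + 1) ms with
      | [] => [(i, i)]
      | (s1, e1) :: r => if s1 = i + 1 then (i, e1) :: r else (i, i) :: (s1, e1) :: r) := by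
  have h0 : pvXRuns i ('X' :: ms) = pvXRunsAux (i + 1) (some i) ms := by
    simp only [pvXRuns, pvXRunsAux, reduceIte, Option.getD_none]
  rw [h0, pvXRunsAux_some ms (i + 1) i]
  rw [show i + 1 - 1 = i from by ring]
  rfl

theorem pvXRuns_X_nil (i : Int) (ms : List Char) (h : pvXRuns (i + 1) ms = []) :
    pvXRuns i ('X' :: ms) = [(i, i)] := by
  rw [pvXRuns_X, h]

theorem pvXRuns_X_adj (i : Int) (ms : List Char) (e1 : Int) (r : List (Int × Int))
    (h : pvXRuns (i + 1) ms = (i + 1, e1) :: r) : pvXRuns i ('X' :: ms) = (i, e1) :: r := by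
  rw [pvXRuns_X, h]; simp

theorem pvXRuns_X_gap (i : Int) (ms : List Char) (s1 e1 : Int) (r : List (Int × Int))
    (h : pvXRuns (i + 1) ms = (s1, e1) :: r) (hne : s1 ≠ i + 1) :
    pvXRuns i ('X' :: ms) = (i, i) :: (s1, e1) :: r := by
  rw [pvXRuns_X, h]; simp [hne]

theorem pvMergeInto_bounds {ft j : Int} : ∀ (runs : List (Int × Int)) (s e : Int), j ≤ s → s ≤ e → pvSep (e + 2) runs →
    ∀ p ∈ pvMergeInto ft s e runs, j ≤ p.1 ∧ p.1 ≤ p.2 := by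
  intro runs
  induction runs with
  | nil =>
    intro s e h1 h2 _ p hp
    simp only [pvMergeInto, List.mem_singleton] at hp
    subst hp; exact ⟨h1, h2⟩
  | cons q rest ih =>
    intro s e h1 h2 h3 p hp
    have h31 : e + 2 ≤ q.1 := h3.1
    have h32 : q.1 ≤ q.2 := h3.2.1
    have h33 : pvSep (q.2 + 2) rest := h3.2.2
    simp only [pvMergeInto] at hp
    split_ifs at hp with hcond
    · exact ih s q.2 h1 (by omega) h33 p hp
    · rcases List.mem_cons.mp hp with hp | hp
      · subst hp; exact ⟨h1, h2⟩
      · exact ih q.1 q.2 (by omega) h32 h33 p hp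

theorem pvMergeRuns_bounds {ft j : Int} {runs : List (Int × Int)} (h : pvSep j runs) :
    ∀ p ∈ pvMergeRuns ft runs, j ≤ p.1 ∧ p.1 ≤ p.2 := by
  cases runs with
  | nil => intro p hp; simp [pvMergeRuns] at hp
  | cons q rest =>
    intro p hp
    exact pvMergeInto_bounds rest q.1 q.2 h.1 h.2.1 h.2.2 p (by simpa [pvMergeRuns] using hp)

theorem pvEmit_shift {j : Int} {ch : Char} {l : List Char} {runs : List (Int × Int)}
    (h : ∀ p ∈ runs, j + 1 ≤ p.1) : pvEmit j (ch :: l) runs = pvEmit (j + 1) l runs := by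
  unfold pvEmit
  refine List.map_congr_left ?_
  intro p hp
  rw [pvSeg_cons j ch l p.1 p.2 (h p hp)]

theorem pvChain_shift {ft j : Int} {ch : Char} {l : List Char} :
    ∀ (runs : List (Int × Int)) (s e : Int) (cur t0 : List Char), j ≤ e → pvSep (j + 1) runs →
    pvChain ft j (ch :: l) s e cur t0 runs = pvChain ft (j + 1) l s e cur t0 runs := by
  intro runs
  induction runs with
  | nil => intro s e cur t0 _ _; simp [pvChain]
  | cons q rest ih =>
    intro s e cur t0 he hs
    have h1 : j + 1 ≤ q.1 := hs.1
    have h2 : q.1 ≤ q.2 := hs.2.1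
    have h3 : pvSep (q.2 + 2) rest := hs.2.2
    simp only [pvChain]
    split_ifs with hcond
    · have hmax : max (e + 1) j = e + 1 := by omega
      have hmax2 : max (e + 1) (j + 1) = e + 1 := by omega
      rw [hmax, hmax2, pvSeg_cons j ch l (e + 1) q.2 (by omega)]
      exact ih s q.2 _ _ (by omega) (pvSep_mono (by omega) h3)
    · congr 1
      exact pvEmit_shift (fun p hp => (pvMergeInto_bounds rest q.1 q.2 h1 h2 h3 p hp).1)

theorem pvChain_gapshift {ft j : Int} {ch : Char} {l : List Char} {runs : List (Int × Int)} {s e : Int}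
    {cur t0 : List Char} (he : e ≤ j - 1) (hs : pvSep (j + 1) runs) :
    pvChain ft j (ch :: l) s e cur t0 runs = pvChain ft (j + 1) l s e cur (t0 ++ [ch]) runs := by
  cases runs with
  | nil => simp [pvChain]
  | cons q rest =>
    have h1 : j + 1 ≤ q.1 := hs.1
    have h2 : q.1 ≤ q.2 := hs.2.1
    have h3 : pvSep (q.2 + 2) rest := hs.2.2
    simp only [pvChain]
    split_ifs with hcond
    · have hmax1 : max (e + 1) j = j := by omega
      have hmax2 : max (e + 1) (j + 1) = j + 1 := by omega
      rw [hmax1, hmax2, pvSeg_head j ch l q.2 (by omega)]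
      have hstr : t0 ++ ch :: pvSeg (j + 1) l (j + 1) q.2
          = (t0 ++ [ch]) ++ pvSeg (j + 1) l (j + 1) q.2 := by simp
      rw [hstr]
      exact pvChain_shift rest s q.2 _ _ (by omega) (pvSep_mono (by omega) h3)
    · congr 1
      exact pvEmit_shift (fun p hp => (pvMergeInto_bounds rest q.1 q.2 h1 h2 h3 p hp).1)

theorem pvChain_break {ft i : Int} {ch : Char} {l : List Char} {runs : List (Int × Int)} {s e : Int}
    {cur t0 : List Char} (hgap : ft < i - e) (he : e ≤ i - 1) (hs : pvSep (i + 1) runs) :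
    pvChain ft i (ch :: l) s e cur t0 runs = (s, e, String.ofList cur) :: pvEmit (i + 1) l (pvMergeRuns ft runs) := by
  cases runs with
  | nil => simp [pvChain, pvMergeRuns, pvEmit]
  | cons q rest =>
    have h1 : i + 1 ≤ q.1 := hs.1
    have h2 : q.1 ≤ q.2 := hs.2.1
    have h3 : pvSep (q.2 + 2) rest := hs.2.2
    simp only [pvChain, pvMergeRuns]
    rw [if_neg (by omega)]
    congr 1
    exact pvEmit_shift (fun p hp => (pvMergeInto_bounds rest q.1 q.2 h1 h2 h3 p hp).1)

theorem pvChain_eq_emit {ft j : Int} {l : List Char} {s : Int} :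
    ∀ (runs : List (Int × Int)) (e : Int), j ≤ s → s ≤ e → pvSep (e + 2) runs →
    pvChain ft j l s e (pvSeg j l s e) (pvSeg j l s e) runs = pvEmit j l (pvMergeInto ft s e runs) := by
  intro runs
  induction runs with
  | nil => intro e _ _ _; simp [pvChain, pvMergeInto, pvEmit]
  | cons q rest ih =>
    intro e h1 h2 h3
    have h31 : e + 2 ≤ q.1 := h3.1
    have h32 : q.1 ≤ q.2 := h3.2.1
    have h33 : pvSep (q.2 + 2) rest := h3.2.2
    simp only [pvChain, pvMergeInto]
    by_cases hft : q.1 - e - 1 ≤ ft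
    · rw [if_pos (Or.inl hft), if_pos hft]
      have hmax : max (e + 1) j = e + 1 := by omega
      rw [hmax, pvSeg_append j l s e q.2 h1 (by omega) (by omega)]
      exact ih q.2 h1 (by omega) h33
    · rw [if_neg (by omega), if_neg hft]
      simp [pvEmit]

theorem pvChain_absorb {ft i : Int} {ch : Char} {l : List Char} {ms : List Char} {s e : Int}
    {cur t0 : List Char} (he : e ≤ i - 1) (hc : i - e - 1 ≤ ft ∨ i = e + 1) :
    pvChain ft i (ch :: l) s e cur t0 (pvXRuns i ('X' :: ms))
      = pvChain ft (i + 1) l s i (t0 ++ [ch]) (t0 ++ [ch]) (pvXRuns (i + 1) ms) := by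
  have hsep := pvSep_xruns ms.length ms le_rfl (i + 1)
  cases hr : pvXRuns (i + 1) ms with
  | nil =>
    rw [pvXRuns_X_nil i ms hr]
    simp only [pvChain]
    rw [if_pos hc]
    have hmax : max (e + 1) i = i := by omega
    rw [hmax, pvSeg_head i ch l i le_rfl, pvSeg_empty (i + 1) l (i + 1) i (by omega)]
  | cons q r =>
    rw [hr] at hsep
    obtain ⟨qs, qe⟩ := q
    have h1 : i + 1 ≤ qs := hsep.1
    have h2 : qs ≤ qe := hsep.2.1
    have h3 : pvSep (qe + 2) r := hsep.2.2
    by_cases hadj : qs = i + 1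
    · subst hadj
      rw [pvXRuns_X_adj i ms qe r hr]
      simp only [pvChain]
      rw [if_pos hc]
      rw [if_pos (show i + 1 - i - 1 ≤ ft ∨ True from Or.inr trivial)]
      have hmax : max (e + 1) i = i := by omega
      rw [hmax, max_self, pvSeg_head i ch l qe (by omega)]
      have hstr : t0 ++ ch :: pvSeg (i + 1) l (i + 1) qe
          = (t0 ++ [ch]) ++ pvSeg (i + 1) l (i + 1) qe := by simp
      rw [hstr]
      exact pvChain_shift r s qe _ _ (by omega) (pvSep_mono (by omega) h3)
    · rw [pvXRuns_X_gap i ms qs qe r hr hadj]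
      simp only [pvChain]
      rw [if_pos hc]
      have hmax : max (e + 1) i = i := by omega
      rw [hmax, pvSeg_head i ch l i le_rfl, pvSeg_empty (i + 1) l (i + 1) i (by omega)]
      exact pvChain_shift ((qs, qe) :: r) s i _ _ le_rfl ⟨h1, h2, h3⟩

theorem pvChain_start {ft i : Int} {ch : Char} {l : List Char} {ms : List Char} :
    pvChain ft (i + 1) l i i [ch] [ch] (pvXRuns (i + 1) ms)
      = pvEmit i (ch :: l) (pvMergeRuns ft (pvXRuns i ('X' :: ms))) := by
  have hsep := pvSep_xruns ms.length ms le_rfl (i + 1)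
  have hch : ([ch] : List Char) = pvSeg i (ch :: l) i i := by
    rw [pvSeg_head i ch l i le_rfl, pvSeg_empty (i + 1) l (i + 1) i (by omega)]
  cases hr : pvXRuns (i + 1) ms with
  | nil =>
    rw [pvXRuns_X_nil i ms hr]
    simp only [pvChain, pvMergeRuns, pvMergeInto, pvEmit, List.map]
    rw [hch]
  | cons q r =>
    rw [hr] at hsep
    obtain ⟨qs, qe⟩ := q
    have h1 : i + 1 ≤ qs := hsep.1
    have h2 : qs ≤ qe := hsep.2.1
    have h3 : pvSep (qe + 2) r := hsep.2.2
    by_cases hadj : qs = i + 1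
    · subst hadj
      rw [pvXRuns_X_adj i ms qe r hr]
      simp only [pvChain, pvMergeRuns]
      rw [if_pos (show i + 1 - i - 1 ≤ ft ∨ True from Or.inr trivial), max_self]
      have hcur : ([ch] : List Char) ++ pvSeg (i + 1) l (i + 1) qe = pvSeg i (ch :: l) i qe := by
        rw [pvSeg_head i ch l qe (by omega)]; simp
      rw [hcur]
      rw [← pvChain_shift r i qe _ _ (by omega) (pvSep_mono (by omega) h3)]
      exact pvChain_eq_emit r qe le_rfl (by omega) h3
    · rw [pvXRuns_X_gap i ms qs qe r hr hadj]
      simp only [pvMergeRuns]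
      rw [← pvChain_shift ((qs, qe) :: r) i i _ _ le_rfl ⟨h1, h2, h3⟩]
      rw [hch]
      exact pvChain_eq_emit ((qs, qe) :: r) i le_rfl le_rfl ⟨by omega, h2, h3⟩

theorem pvScanA_X (ft : Int) (ms l : List Char) (ch : Char) (i : Int) (acc : List (Int × Int × String))
    (cur t : List Char) (ls le : Int) :
    pvScanA ft ('X' :: ms) (ch :: l) i acc cur t ls le
      = pvScanA ft ms l (i + 1) acc ((if t ≠ [] then t else cur) ++ [ch]) [] (if ls = -1 then i else ls) i := by
  simp [pvScanA]

theorem pvScanA_gap (ft : Int) {c : Char} (ms l : List Char) (ch : Char) (i : Int)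
    (acc : List (Int × Int × String)) {cur : List Char} (t : List Char) (ls le : Int)
    (hc : c ≠ 'X') (hcur : cur ≠ []) (hft : i - le ≤ ft) :
    pvScanA ft (c :: ms) (ch :: l) i acc cur t ls le
      = pvScanA ft ms l (i + 1) acc cur ((if t = [] then cur else t) ++ [ch]) ls le := by
  simp [pvScanA, hc, hcur, hft]

theorem pvScanA_brk (ft : Int) {c : Char} (ms l : List Char) (ch : Char) (i : Int)
    (acc : List (Int × Int × String)) {cur : List Char} (t : List Char) (ls le : Int)
    (hc : c ≠ 'X') (hcur : cur ≠ []) (hft : ¬ i - le ≤ ft) :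
    pvScanA ft (c :: ms) (ch :: l) i acc cur t ls le
      = pvScanA ft ms l (i + 1) (acc ++ [(ls, le, String.ofList cur)]) [] [] (-1) le := by
  simp [pvScanA, hc, hcur, hft]

theorem pvScanA_skip (ft : Int) {c : Char} (ms l : List Char) (ch : Char) (i : Int)
    (acc : List (Int × Int × String)) {cur : List Char} (t : List Char) (ls le : Int)
    (hc : c ≠ 'X') (hcur : cur = []) :
    pvScanA ft (c :: ms) (ch :: l) i acc cur t ls le = pvScanA ft ms l (i + 1) acc cur t ls le := by
  simp [pvScanA, hc, hcur]

theorem pvMain (ft : Int) (ms : List Char) :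
    (∀ (l : List Char) (i : Int) (acc : List (Int × Int × String)) (le : Int),
      ms.length = l.length → 0 ≤ i →
      pvFin (pvScanA ft ms l i acc [] [] (-1) le) = acc ++ pvEmit i l (pvMergeRuns ft (pvXRuns i ms)))
    ∧
    (∀ (l : List Char) (i : Int) (acc : List (Int × Int × String)) (cur t : List Char) (s e : Int),
      ms.length = l.length → 0 ≤ i → 0 ≤ s → cur ≠ [] → e ≤ i - 1 →
      (t = [] → i = e + 1) → (t ≠ [] → i - e - 1 ≤ ft) →
      pvFin (pvScanA ft ms l i acc cur t s e)
        = acc ++ pvChain ft i l s e cur (if t = [] then cur else t) (pvXRuns i ms)) := by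
  induction ms with
  | nil =>
    constructor
    · intro l i acc le _ _
      simp [pvScanA, pvFin, pvXRuns_nil, pvMergeRuns, pvEmit]
    · intro l i acc cur t s e _ _ _ hcur _ _ _
      simp [pvScanA, pvFin, hcur, pvXRuns_nil, pvChain]
  | cons c ms ih =>
    constructor
    · -- idle state
      intro l i acc le hlen hi
      cases l with
      | nil => simp at hlen
      | cons ch l' =>
        simp only [List.length_cons] at hlen
        by_cases hc : c = 'X'
        · subst hc
          rw [pvScanA_X]
          norm_num
          rw [ih.2 l' (i + 1) acc [ch] [] i i (by omega) (by omega) hi (by simp) (by omega)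
            (fun _ => rfl) (fun h => absurd rfl h)]
          simp only [reduceIte]
          rw [pvChain_start]
        · rw [pvScanA_skip ft ms l' ch i acc [] (-1) le hc rfl]
          rw [ih.1 l' (i + 1) acc le (by omega) (by omega)]
          rw [pvXRuns_nonX hc i ms]
          have hsep := pvSep_xruns ms.length ms le_rfl (i + 1)
          rw [pvEmit_shift (fun p hp => (pvMergeRuns_bounds hsep p hp).1)]
    · -- active state
      intro l i acc cur t s e hlen hi hs hcur he ht1 ht2
      cases l with
      | nil => simp at hlen
      | cons ch l' =>
        simp only [List.length_cons] at hlen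
        have hsep := pvSep_xruns ms.length ms le_rfl (i + 1)
        by_cases hc : c = 'X'
        · subst hc
          rw [pvScanA_X]
          rw [if_neg (by omega : ¬ s = -1)]
          rw [ih.2 l' (i + 1) acc ((if t ≠ [] then t else cur) ++ [ch]) [] s i (by omega)
            (by omega) hs (by simp) (by omega) (fun _ => rfl) (fun h => absurd rfl h)]
          simp only [reduceIte]
          have hcond : i - e - 1 ≤ ft ∨ i = e + 1 := by
            rcases eq_or_ne t [] with h | h
            · exact Or.inr (ht1 h)
            · exact Or.inl (ht2 h)
          rw [pvChain_absorb he hcond]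
          have hts : (if t ≠ [] then t else cur) = (if t = [] then cur else t) := by
            by_cases h : t = [] <;> simp [h]
          rw [hts]
        · by_cases hft : i - e ≤ ft
          · rw [pvScanA_gap ft ms l' ch i acc t s e hc hcur hft]
            rw [ih.2 l' (i + 1) acc cur ((if t = [] then cur else t) ++ [ch]) s e (by omega)
              (by omega) hs hcur (by omega) (fun h => absurd h (by simp)) (fun _ => by omega)]
            rw [if_neg (by simp : ¬ ((if t = [] then cur else t) ++ [ch] = []))]
            rw [pvXRuns_nonX hc i ms]
            rw [pvChain_gapshift (by omega) hsep]
          · rw [pvScanA_brk ft ms l' ch i acc t s e hc hcur hft]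
            rw [ih.1 l' (i + 1) (acc ++ [(s, e, String.ofList cur)]) e (by omega) (by omega)]
            rw [pvXRuns_nonX hc i ms]
            rw [pvChain_break (by omega) he hsep]
            simp

theorem pvScanA_state (ft : Int) : ∀ (ms l : List Char) (i : Int) (acc : List (Int × Int × String))
    (cur t : List Char) (ls le : Int), (cur = [] → t = [] ∧ ls = -1) →
    ((pvScanA ft ms l i acc cur t ls le).2.1 = [] →
      (pvScanA ft ms l i acc cur t ls le).2.2.1 = [] ∧ (pvScanA ft ms l i acc cur t ls le).2.2.2.1 = -1) := by
  intro ms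
  induction ms with
  | nil => intro l i acc cur t ls le h; simpa [pvScanA] using h
  | cons c ms ih =>
    intro l i acc cur t ls le h
    cases l with
    | nil => simpa [pvScanA] using h
    | cons ch l' =>
      by_cases hc : c = 'X'
      · subst hc
        rw [pvScanA_X]
        exact ih _ _ _ _ _ _ _ (fun hx => by simp at hx)
      · by_cases hcur : cur = []
        · rw [pvScanA_skip ft ms l' ch i acc t ls le hc hcur]
          exact ih _ _ _ _ _ _ _ h
        · by_cases hft : i - le ≤ ft
          · rw [pvScanA_gap ft ms l' ch i acc t ls le hc hcur hft]
            exact ih _ _ _ _ _ _ _ (fun hx => absurd hx hcur)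
          · rw [pvScanA_brk ft ms l' ch i acc t ls le hc hcur hft]
            exact ih _ _ _ _ _ _ _ (fun _ => ⟨rfl, rfl⟩)

theorem pvFoldSet_length : ∀ (js : List Int) (m : List Char),
    (js.foldl (fun m j => m.set j.toNat 'X') m).length = m.length := by
  intro js
  induction js with
  | nil => intro m; rfl
  | cons j js ih => intro m; rw [List.foldl_cons, ih, List.length_set]

theorem pvMaskRange_length (m : List Char) (a b : Int) : (pvMaskRange m a b).length = m.length :=
  pvFoldSet_length _ m

theorem pvMaskLine_length (l : List Char) (k : Int) (ud : PySem.Dict String Int) :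
    (pvMaskLine l k ud).length = l.length := by
  unfold pvMaskLine
  generalize (PySem.List.pyRange 0 (PySem.List.len l - k + 1) 1) = js
  have h : ∀ (js : List Int) (st : List Char × Int),
      ((js.foldl (fun (st : List Char × Int) i =>
        let kmer := PySem.List.slice l (some i) (some (i + k))
        let r_kmer := pvRevComp kmer
        if 'N' ∈ r_kmer then st
        else
          let unique_key := if pvStrLt kmer r_kmer then kmer else r_kmer
          if ud.contains (String.ofList unique_key) then
            if st.2 = -1 then
              (pvMaskRange st.1 i (i + k), i + k - 1)
            else
              (pvMaskRange st.1 (if st.2 < i then i else st.2 + 1) (i + k), i + k - 1)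
          else st) st).1).length = st.1.length := by
    intro js
    induction js with
    | nil => intro st; rfl
    | cons j js ih =>
      intro st
      rw [List.foldl_cons, ih]
      dsimp only
      split_ifs <;> simp [pvMaskRange_length]
  exact h js (l, -1)

theorem pvPerContig (ft : Int) (lineL ms : List Char) (acc : List (Int × Int × String)) (le : Int)
    (hlen : ms.length = lineL.length) :
    pvFin (pvScanA ft ms lineL 0 acc [] [] (-1) le)
      = acc ++ (pvMergeRuns ft (pvXRuns 0 ms)).map
          (fun p => (p.1, p.2, String.ofList (PySem.List.slice lineL (some p.1) (some (p.2 + 1))))) := by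
  rw [(pvMain ft ms).1 lineL 0 acc le hlen le_rfl]
  congr 1
  unfold pvEmit
  refine List.map_congr_left ?_
  intro p hp
  obtain ⟨hb1, hb2⟩ := pvMergeRuns_bounds (pvSep_xruns ms.length ms le_rfl 0) p hp
  rw [PySem.List.slice_toNat lineL (by omega) (by omega)]
  unfold pvSeg
  rw [show (p.1 - 0).toNat = p.1.toNat from by omega,
      show (p.2 + 1 - p.1).toNat = (p.2 + 1).toNat - p.1.toNat from by omega]

theorem pvOuter (ft : Int) : ∀ (trips : List (String × List Char × List Char))
    (d : PySem.Dict String (List (Int × Int × String))) (le : Int),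
    d.keys.Nodup → (trips.map (·.1)).Nodup → (∀ p ∈ trips, d.contains p.1 = false) →
    (∀ p ∈ trips, p.2.2.length = p.2.1.length) →
    ((trips.foldl
      (fun (st : PySem.Dict String (List (Int × Int × String)) × List Char × List Char × Int × Int) item =>
        let d := if st.1.contains item.1 then st.1 else st.1.insert item.1 []
        let r := pvScanA ft item.2.2 item.2.1 0 (d.getD item.1 []) st.2.1 st.2.2.1 st.2.2.2.1 st.2.2.2.2
        if r.2.1 ≠ [] then
          (d.insert item.1 (r.1 ++ [(r.2.2.2.1, r.2.2.2.2, String.ofList r.2.1)]), [], [], -1, r.2.2.2.2)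
        else (d.insert item.1 r.1, r.2.1, r.2.2.1, r.2.2.2.1, r.2.2.2.2))
      (d, [], [], -1, le)).1).items
      = d.items ++ trips.map (fun p => (p.1, (pvMergeRuns ft (pvXRuns 0 p.2.2)).map
          (fun q => (q.1, q.2, String.ofList (PySem.List.slice p.2.1 (some q.1) (some (q.2 + 1))))))) := by
  intro trips
  induction trips with
  | nil => intro d le _ _ _ _; simp
  | cons p rest ih =>
    intro d le hnd hnodup hfresh hlen
    set f := (fun (st : PySem.Dict String (List (Int × Int × String)) × List Char × List Char × Int × Int) (item : String × List Char × List Char) =>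
        let d := if st.1.contains item.1 then st.1 else st.1.insert item.1 []
        let r := pvScanA ft item.2.2 item.2.1 0 (d.getD item.1 []) st.2.1 st.2.2.1 st.2.2.2.1 st.2.2.2.2
        if r.2.1 ≠ [] then
          (d.insert item.1 (r.1 ++ [(r.2.2.2.1, r.2.2.2.2, String.ofList r.2.1)]), [], [], -1, r.2.2.2.2)
        else (d.insert item.1 r.1, r.2.1, r.2.2.1, r.2.2.2.1, r.2.2.2.2)) with hf
    have hcp : d.contains p.1 = false := hfresh p List.mem_cons_self
    have hfin : pvFin (pvScanA ft p.2.2 p.2.1 0 [] [] [] (-1) le)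
        = (pvMergeRuns ft (pvXRuns 0 p.2.2)).map
            (fun q => (q.1, q.2, String.ofList (PySem.List.slice p.2.1 (some q.1) (some (q.2 + 1))))) := by
      rw [pvPerContig ft p.2.1 p.2.2 [] le (hlen p List.mem_cons_self)]
      simp
    have hstep : f (d, [], [], -1, le) p
        = (d.insert p.1 (pvFin (pvScanA ft p.2.2 p.2.1 0 [] [] [] (-1) le)), [], [], -1,
            (pvScanA ft p.2.2 p.2.1 0 [] [] [] (-1) le).2.2.2.2) := by
      rw [hf]
      dsimp only
      rw [hcp]
      simp only [Bool.false_eq_true, if_false]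
      rw [PySem.Dict.getD_insert_self]
      by_cases hcur : (pvScanA ft p.2.2 p.2.1 0 [] [] [] (-1) le).2.1 = []
      · rw [if_neg (fun h => h hcur)]
        obtain ⟨ht, hls⟩ := pvScanA_state ft p.2.2 p.2.1 0 [] [] [] (-1) le (fun _ => ⟨rfl, rfl⟩) hcur
        rw [hcur, ht, hls]
        rw [show (pvScanA ft p.2.2 p.2.1 0 [] [] [] (-1) le).1
            = pvFin (pvScanA ft p.2.2 p.2.1 0 [] [] [] (-1) le) from by simp [pvFin, hcur]]
        rw [PySem.Dict.insert_insert_self]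
      · rw [if_pos hcur]
        rw [show (pvScanA ft p.2.2 p.2.1 0 [] [] [] (-1) le).1
              ++ [((pvScanA ft p.2.2 p.2.1 0 [] [] [] (-1) le).2.2.2.1,
                   (pvScanA ft p.2.2 p.2.1 0 [] [] [] (-1) le).2.2.2.2,
                   String.ofList (pvScanA ft p.2.2 p.2.1 0 [] [] [] (-1) le).2.1)]
            = pvFin (pvScanA ft p.2.2 p.2.1 0 [] [] [] (-1) le) from by simp [pvFin, hcur]]
        rw [PySem.Dict.insert_insert_self]
    rw [List.foldl_cons, hstep]
    rw [ih (d.insert p.1 (pvFin (pvScanA ft p.2.2 p.2.1 0 [] [] [] (-1) le)))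
        ((pvScanA ft p.2.2 p.2.1 0 [] [] [] (-1) le).2.2.2.2)
        (PySem.Dict.nodup_keys_insert d p.1 _ hnd)
        ((List.nodup_cons.mp hnodup).2)
        (fun q hq => by
          rw [PySem.Dict.contains_insert]
          have hmem : q.1 ∈ rest.map (·.1) := List.mem_map_of_mem (f := (·.1)) hq
          have hne : q.1 ≠ p.1 := by
            intro hh
            rw [hh] at hmem
            exact (List.nodup_cons.mp hnodup).1 hmem
          simp [hfresh q (List.mem_cons_of_mem p hq), hne])
        (fun q hq => hlen q (List.mem_cons_of_mem p hq))]
    rw [PySem.Dict.items_insert_of_not_contains d _ hcp, List.map_cons, List.append_assoc, hfin]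
    rfl

-- ===== VERDICT (by name: the statement is the Claim_ definition above) =====
theorem generate_candidate_repeats_v2_spec : Claim_equal_generate_candidate_repeats_v2 := by
  intro contigs k_num unique_kmer_map partiton_index fault_tolerant_bases _
  unfold Spec_generate_candidate_repeats_v2
  unfold generate_candidate_repeats_v2 generate_candidate_repeats_v2_alt
  have hkeys : ((pvPrep contigs k_num unique_kmer_map).map (·.1)) = (PySem.Dict.ofList contigs).keys := by
    unfold pvPrep
    dsimp only
    generalize (PySem.Dict.ofList contigs).keys = L
    induction L with
    | nil => rfl
    | cons a t iht =>
      simp only [List.map_cons] at iht ⊢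
      exact congrArg (List.cons a) iht
  rw [pvOuter fault_tolerant_bases (pvPrep contigs k_num unique_kmer_map) PySem.Dict.empty (-1)
      PySem.Dict.nodup_keys_empty
      (by rw [hkeys]; exact PySem.Dict.nodup_keys_ofList contigs)
      (fun q _ => PySem.Dict.contains_empty q.1)
      (by
        intro q hq
        unfold pvPrep at hq
        obtain ⟨r, hr, rfl⟩ := List.mem_map.mp hq
        exact pvMaskLine_length _ _ _)]
  rw [show (PySem.Dict.empty : PySem.Dict String (List (Int × Int × String))).items = [] from rfl,
      List.nil_append]
  unfold pvPrep
  rw [List.map_map]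
  rfl
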